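-- pv_equiv track=rewrite | github.com/NelsonOoi/bandsolver | pinn_fourier.py | c4v_fourier_orbits
-- ===== SOURCE A (Python) =====
-- def c4v_fourier_orbits(N: int):
--     """Compute independent Fourier coefficient orbits under C4v symmetry.
--
--     The C4v group on (m1, m2) mod N consists of 8 operations:
--         identity, 3 rotations (90, 180, 270), and 4 reflections.
--
--     Since the dielectric is real, eps_hat(-G) = eps_hat(G)*, and with
--     C4v symmetry all coefficients in an orbit share the same real value.
--
--     Args:
--         N: grid size (should be even).
--
--     Returns:
--         orbits: list of lists, each containing (i, j) tuples in the orbit.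
--         n_indep: number of independent real coefficients.
--     """
--     visited = set()
--     orbits = []
--
--     for m1 in range(N):
--         for m2 in range(N):
--             if (m1, m2) in visited:
--                 continue
--             orbit = set()
--             # C4v generators: 4 rotations x {identity, reflection}
--             pairs = [
--                 (m1, m2), (m2, (-m1) % N),          # rot 0, 90
--                 ((-m1) % N, (-m2) % N), ((-m2) % N, m1),  # rot 180, 270
--                 (m2, m1), (m1, (-m2) % N),           # reflections
--                 ((-m2) % N, (-m1) % N), ((-m1) % N, m2),
--             ]
--             # Also add negatives (reality constraint: eps_hat(-G) = eps_hat(G)*)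
--             all_pairs = []
--             for p in pairs:
--                 all_pairs.append(p)
--                 all_pairs.append(((-p[0]) % N, (-p[1]) % N))
--
--             for p in all_pairs:
--                 orbit.add(p)
--
--             visited.update(orbit)
--             orbits.append(sorted(orbit))
--
--     return orbits, len(orbits)
-- ===== SOURCE B (Python) =====
-- def c4v_fourier_orbits(N: int):
--     """Compute independent Fourier coefficient orbits under C4v symmetry.
--
--     Canonical-representative grouping: instead of a visited set with per-cell
--     orbit enumeration, map every cell once to the lexicographic minimum of its
--     C4v+reality image set {(+-m1,+-m2), (+-m2,+-m1)} mod N and group cells by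
--     that canonical key in a dict.  Buckets fill in row-major (= lexicographic)
--     scan order, so each bucket is already the sorted orbit, and dict insertion
--     order (first appearance of a key = the orbit's minimum) reproduces A's
--     orbit order.
--     """
--     buckets = {}
--     for m1 in range(N):
--         for m2 in range(N):
--             n1 = -m1 % N
--             n2 = -m2 % N
--             key = min((m1, m2), (m1, n2), (n1, m2), (n1, n2),
--                       (m2, m1), (m2, n1), (n2, m1), (n2, n1))
--             if key in buckets:
--                 buckets[key].append((m1, m2))
--             else:
--                 buckets[key] = [(m1, m2)]
--     orbits = list(buckets.values())
--     return orbits, len(orbits)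
-- ===== Notes on version B (the rewrite author's own statement) =====
-- stated objective: alternative
-- what changed: Replaces A's visited-set scan that enumerates and sorts a 16-pair orbit at each unseen cell with a single-pass canonical-key grouping: every cell is mapped to the lexicographic minimum of its C4v+reality image set and appended to a dict bucket under that key, so the visited set and the per-orbit sorted() call disappear (buckets fill in scan order, which is already sorted, and dict insertion order reproduces A's orbit order).
import Mathlib
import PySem

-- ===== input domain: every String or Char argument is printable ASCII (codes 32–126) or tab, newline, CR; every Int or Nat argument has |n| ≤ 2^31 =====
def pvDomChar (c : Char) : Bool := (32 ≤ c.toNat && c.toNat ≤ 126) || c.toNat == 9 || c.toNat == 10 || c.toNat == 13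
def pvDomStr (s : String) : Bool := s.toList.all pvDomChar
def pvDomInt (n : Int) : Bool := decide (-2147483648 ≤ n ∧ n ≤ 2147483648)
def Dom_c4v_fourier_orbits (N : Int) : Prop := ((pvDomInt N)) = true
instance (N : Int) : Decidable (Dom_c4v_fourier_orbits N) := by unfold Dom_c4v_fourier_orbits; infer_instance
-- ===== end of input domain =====

-- B replaces A's visited-set scan with per-orbit enumeration by a one-pass canonical-key
-- (lexicographic orbit minimum) grouping into a dict; alternative algorithm, similar cost.


-- ===== PORT A =====
-- A's orbit set: the hardcoded 8-pair list, then the loop appending each pair and its negation,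
-- all collected into a set ('orbit.add(p)' for p in all_pairs).
def pvOrbitA (N m1 m2 : Int) : PySem.Set (Int × Int) :=
  let pairs : List (Int × Int) :=
    [(m1, m2), (m2, PySem.Int.mod (-m1) N),
     (PySem.Int.mod (-m1) N, PySem.Int.mod (-m2) N), (PySem.Int.mod (-m2) N, m1),
     (m2, m1), (m1, PySem.Int.mod (-m2) N),
     (PySem.Int.mod (-m2) N, PySem.Int.mod (-m1) N), (PySem.Int.mod (-m1) N, m2)]
  let all_pairs := pairs.foldl
    (fun acc p => (acc ++ [p]) ++ [(PySem.Int.mod (-p.1) N, PySem.Int.mod (-p.2) N)]) []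
  all_pairs.foldl PySem.Set.add PySem.Set.empty

-- the body of A's inner loop (visited, orbits as the two state components)
def pvStepA (N m1 m2 : Int) (st : PySem.Set (Int × Int) × List (List (Int × Int))) :
    PySem.Set (Int × Int) × List (List (Int × Int)) :=
  if (m1, m2) ∈ st.1 then st
  else
    (PySem.Set.update st.1 (pvOrbitA N m1 m2),
     st.2 ++ [PySem.List.sorted (pvOrbitA N m1 m2) (fun p => toLex p)])

def c4v_fourier_orbits (N : Int) : (List (List (Int × Int))) × Int :=
  let st := (PySem.List.pyRange 0 N).foldl
    (fun st m1 => (PySem.List.pyRange 0 N).foldl (fun st m2 => pvStepA N m1 m2 st) st)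
    ((PySem.Set.empty : PySem.Set (Int × Int)), ([] : List (List (Int × Int))))
  (st.2, (st.2.length : Int))

-- ===== PORT B =====
-- n1 = -m1 % N; n2 = -m2 % N; key = min(<the 8 image pairs>): Python's tuple-lex min of
-- nonempty arguments; the list is never empty, so .getD is inert
def pvKey (N m1 m2 : Int) : Int × Int :=
  let n1 := PySem.Int.mod (-m1) N
  let n2 := PySem.Int.mod (-m2) N
  (PySem.List.min2?
    [(m1, m2), (m1, n2), (n1, m2), (n1, n2), (m2, m1), (m2, n1), (n2, m1), (n2, n1)]
    (fun p => p.1) (fun p => p.2)).getD (m1, m2)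

-- the body of B's inner loop over the buckets dict
def pvStepB (N m1 m2 : Int) (d : PySem.Dict (Int × Int) (List (Int × Int))) :
    PySem.Dict (Int × Int) (List (Int × Int)) :=
  if d.contains (pvKey N m1 m2) then d.modify (pvKey N m1 m2) [] (fun l => l ++ [(m1, m2)])
  else d.insert (pvKey N m1 m2) [(m1, m2)]

def c4v_fourier_orbits_alt (N : Int) : (List (List (Int × Int))) × Int :=
  let buckets := (PySem.List.pyRange 0 N).foldl
    (fun d m1 => (PySem.List.pyRange 0 N).foldl (fun d m2 => pvStepB N m1 m2 d) d)
    (PySem.Dict.empty : PySem.Dict (Int × Int) (List (Int × Int)))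
  let orbits := buckets.values
  (orbits, (orbits.length : Int))

-- ===== PRECONDITION & SPEC =====
def Spec_c4v_fourier_orbits (N : Int) (out : (List (List (Int × Int))) × Int) : Prop := out = c4v_fourier_orbits_alt N
instance (N : Int) (out : (List (List (Int × Int))) × Int) : Decidable (Spec_c4v_fourier_orbits N out) := by unfold Spec_c4v_fourier_orbits; infer_instance

-- ===== CLAIM (what is proved, stated in full; the proofs are below) =====
def Claim_equal_c4v_fourier_orbits : Prop := ∀ (N : Int), Dom_c4v_fourier_orbits N → Spec_c4v_fourier_orbits N (c4v_fourier_orbits N)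

-- ===== LEMMAS AND PROOFS =====

-- notation for the proofs: ν m = (-m) % N, the grid, lexicographic order on cells
def pvNu (N m : Int) : Int := PySem.Int.mod (-m) N
def pvGrid (N : Int) (p : Int × Int) : Prop := 0 ≤ p.1 ∧ p.1 < N ∧ 0 ≤ p.2 ∧ p.2 < N
def pvLt (p q : Int × Int) : Prop := p.1 < q.1 ∨ (p.1 = q.1 ∧ p.2 < q.2)
-- the 8 distinct images forms of a cell (a, b): {(±a,±b), (±b,±a)} mod N
def pvForms (N a b : Int) : List (Int × Int) :=
  [(a, b), (a, pvNu N b), (pvNu N a, b), (pvNu N a, pvNu N b),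
   (b, a), (b, pvNu N a), (pvNu N b, a), (pvNu N b, pvNu N a)]
def pvCanon (N : Int) (p : Int × Int) : Int × Int := pvKey N p.1 p.2
def pvReps (N : Int) (l : List (Int × Int)) : List (Int × Int) :=
  l.filter (fun p => pvCanon N p == p)
def pvScan (N : Int) : List (Int × Int) :=
  (PySem.List.pyRange 0 N).flatMap (fun m1 => (PySem.List.pyRange 0 N).map (fun m2 => (m1, m2)))

lemma pvNegmod (N m : Int) (hN : 0 < N) (h0 : 0 ≤ m) (h1 : m < N) :
    PySem.Int.mod (-m) N = if m = 0 then 0 else N - m := by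
  rw [PySem.Int.mod_eq_emod_of_pos hN]
  split_ifs with h
  · subst h; simp
  · have hrw : -m = (N - m) + N * (-1) := by ring
    rw [hrw, Int.add_mul_emod_self_left]
    exact Int.emod_eq_of_lt (by omega) (by omega)

lemma pvNuNu (N m : Int) (hN : 0 < N) (h0 : 0 ≤ m) (h1 : m < N) :
    pvNu N (pvNu N m) = m := by
  unfold pvNu
  by_cases h : m = 0
  · subst h
    rw [pvNegmod N 0 hN le_rfl hN, if_pos rfl]
    simpa using pvNegmod N 0 hN le_rfl hN
  · rw [pvNegmod N m hN h0 h1, if_neg h,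
        pvNegmod N (N - m) hN (by omega) (by omega), if_neg (by omega)]
    ring

lemma pvNuGrid (N m : Int) (hN : 0 < N) : 0 ≤ pvNu N m ∧ pvNu N m < N :=
  ⟨PySem.Int.mod_nonneg _ hN, PySem.Int.mod_lt _ hN⟩

lemma pvOrbitA_mem (N a b : Int) (hN : 0 < N) (ha : 0 ≤ a) (ha' : a < N)
    (hb : 0 ≤ b) (hb' : b < N) (q : Int × Int) :
    q ∈ pvOrbitA N a b ↔ q ∈ pvForms N a b := by
  have hA := pvNuNu N a hN ha ha'
  have hB := pvNuNu N b hN hb hb'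
  unfold pvNu at hA hB
  rw [show pvOrbitA N a b = PySem.Set.ofList
      ([(a, b), (b, PySem.Int.mod (-a) N),
        (PySem.Int.mod (-a) N, PySem.Int.mod (-b) N), (PySem.Int.mod (-b) N, a),
        (b, a), (a, PySem.Int.mod (-b) N),
        (PySem.Int.mod (-b) N, PySem.Int.mod (-a) N), (PySem.Int.mod (-a) N, b)].foldl
        (fun acc p => (acc ++ [p]) ++ [(PySem.Int.mod (-p.1) N, PySem.Int.mod (-p.2) N)]) []) from rfl,
     PySem.Set.mem_ofList]
  simp only [List.foldl_cons, List.foldl_nil, List.nil_append, List.cons_append,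
    List.mem_cons, List.not_mem_nil, or_false, hA, hB, pvForms, pvNu]
  tauto
lemma pvOrbitA_nodup (N a b : Int) : (pvOrbitA N a b).Nodup := by
  rw [show pvOrbitA N a b = PySem.Set.ofList
      ([(a, b), (b, PySem.Int.mod (-a) N),
        (PySem.Int.mod (-a) N, PySem.Int.mod (-b) N), (PySem.Int.mod (-b) N, a),
        (b, a), (a, PySem.Int.mod (-b) N),
        (PySem.Int.mod (-b) N, PySem.Int.mod (-a) N), (PySem.Int.mod (-a) N, b)].foldl
        (fun acc p => (acc ++ [p]) ++ [(PySem.Int.mod (-p.1) N, PySem.Int.mod (-p.2) N)]) []) from rfl]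
  exact PySem.Set.nodup_ofList _

lemma pvForms_grid (N a b : Int) (hN : 0 < N) (ha : 0 ≤ a) (ha' : a < N)
    (hb : 0 ≤ b) (hb' : b < N) (q : Int × Int) (hq : q ∈ pvForms N a b) :
    pvGrid N q := by
  have hna := pvNuGrid N a hN
  have hnb := pvNuGrid N b hN
  simp only [pvForms, List.mem_cons, List.not_mem_nil, or_false] at hq
  rcases hq with h|h|h|h|h|h|h|h <;> subst h <;>
    exact ⟨by simp; omega, by simp; omega, by simp; omega, by simp; omega⟩

lemma pvForms_closed (N a b : Int) (hN : 0 < N) (ha : 0 ≤ a) (ha' : a < N)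
    (hb : 0 ≤ b) (hb' : b < N) (q : Int × Int) (hq : q ∈ pvForms N a b) (r : Int × Int) :
    r ∈ pvForms N q.1 q.2 ↔ r ∈ pvForms N a b := by
  have hA := pvNuNu N a hN ha ha'
  have hB := pvNuNu N b hN hb hb'
  simp only [pvForms, List.mem_cons, List.not_mem_nil, or_false] at hq ⊢
  rcases hq with h|h|h|h|h|h|h|h <;> subst h <;> simp only [hA, hB] <;> tauto
lemma pvLt_irrefl (p : Int × Int) : ¬ pvLt p p := by unfold pvLt; omega

lemma pvMinCons (m0 x : Int × Int) (t : List (Int × Int)) :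
    PySem.List.min2? (m0 :: x :: t) (fun p => p.1) (fun p => p.2)
      = if (decide (x.1 < m0.1) || !decide (m0.1 < x.1) && decide (x.2 < m0.2)) = true
        then PySem.List.min2? (x :: t) (fun p => p.1) (fun p => p.2)
        else PySem.List.min2? (m0 :: t) (fun p => p.1) (fun p => p.2) := by
  by_cases hc : (decide (x.1 < m0.1) || !decide (m0.1 < x.1) && decide (x.2 < m0.2)) = true
  · rw [if_pos hc]
    simp only [PySem.List.min2?, List.foldl_cons, hc, if_pos]
  · rw [if_neg hc]
    simp only [PySem.List.min2?, List.foldl_cons]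
    congr 1
    simp [hc]

lemma pvMin2_spec_aux (n : Nat) : ∀ xs : List (Int × Int), xs.length ≤ n → xs ≠ [] →
    ∃ m, PySem.List.min2? xs (fun p => p.1) (fun p => p.2) = some m ∧
      m ∈ xs ∧ ∀ y ∈ xs, ¬ pvLt y m := by
  induction n with
  | zero =>
    intro xs hlen hne
    cases xs with
    | nil => exact absurd rfl hne
    | cons a t => simp at hlen
  | succ n ih =>
    intro xs hlen hne
    cases xs with
    | nil => exact absurd rfl hne
    | cons m0 rest =>
      cases rest with
      | nil =>
        refine ⟨m0, by simp [PySem.List.min2?], by simp, ?_⟩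
        intro y hy
        simp at hy
        subst hy
        exact pvLt_irrefl _
      | cons x t =>
        rw [pvMinCons]
        simp only [List.length_cons] at hlen
        by_cases hc : (decide (x.1 < m0.1) || !decide (m0.1 < x.1) && decide (x.2 < m0.2)) = true
        · rw [if_pos hc]
          obtain ⟨m, hm, hmem, hall⟩ := ih (x :: t) (by simp; omega) (by simp)
          refine ⟨m, hm, List.mem_cons_of_mem _ hmem, ?_⟩
          intro y hy
          rcases List.mem_cons.mp hy with h|h
          · subst h
            have hxm := hall x List.mem_cons_self
            simp only [Bool.or_eq_true, Bool.and_eq_true, decide_eq_true_eq, Bool.not_eq_true',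
              decide_eq_false_iff_not] at hc
            unfold pvLt at *
            omega
          · exact hall y h
        · rw [if_neg hc]
          obtain ⟨m, hm, hmem, hall⟩ := ih (m0 :: t) (by simp; omega) (by simp)
          refine ⟨m, hm, ?_, ?_⟩
          · rcases List.mem_cons.mp hmem with h|h
            · simp [h]
            · exact List.mem_cons_of_mem _ (List.mem_cons_of_mem _ h)
          · intro y hy
            have hm0 := hall m0 List.mem_cons_self
            rcases List.mem_cons.mp hy with h|h
            · subst h; exact hm0
            · rcases List.mem_cons.mp h with h'|h'
              · subst h'
                simp only [Bool.or_eq_true, Bool.and_eq_true, decide_eq_true_eq,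
                  Bool.not_eq_true', decide_eq_false_iff_not] at hc
                unfold pvLt at *
                omega
              · exact hall y (List.mem_cons_of_mem _ h')

lemma pvMin2_spec (xs : List (Int × Int)) (hne : xs ≠ []) :
    ∃ m, PySem.List.min2? xs (fun p => p.1) (fun p => p.2) = some m ∧
      m ∈ xs ∧ ∀ y ∈ xs, ¬ pvLt y m :=
  pvMin2_spec_aux xs.length xs le_rfl hne
lemma pvForms_self (N a b : Int) : (a, b) ∈ pvForms N a b := by
  simp [pvForms]

lemma pvLt_asymm_eq (m m' : Int × Int) (h1 : ¬ pvLt m m') (h2 : ¬ pvLt m' m) : m = m' := by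
  unfold pvLt at h1 h2
  rw [Prod.ext_iff]
  omega

lemma pvCanon_spec (N : Int) (p : Int × Int) (_hN : 0 < N) (_hg : pvGrid N p) :
    pvCanon N p ∈ pvForms N p.1 p.2 ∧ ∀ y ∈ pvForms N p.1 p.2, ¬ pvLt y (pvCanon N p) := by
  have hz : pvCanon N p
      = (PySem.List.min2? (pvForms N p.1 p.2) (fun q => q.1) (fun q => q.2)).getD (p.1, p.2) :=
    rfl
  obtain ⟨m, hm, hmm, hall⟩ := pvMin2_spec (pvForms N p.1 p.2) (by simp [pvForms])
  rw [hz, hm, Option.getD_some]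
  exact ⟨hmm, hall⟩

set_option maxHeartbeats 1000000 in
lemma pvCanon_eq_of_mem (N : Int) (p q : Int × Int) (hN : 0 < N) (hg : pvGrid N p)
    (hq : q ∈ pvForms N p.1 p.2) : pvCanon N q = pvCanon N p := by
  obtain ⟨h1, h2, h3, h4⟩ := hg
  have hiff := pvForms_closed N p.1 p.2 hN h1 h2 h3 h4 q hq
  obtain ⟨hgq1, hgq2, hgq3, hgq4⟩ := pvForms_grid N p.1 p.2 hN h1 h2 h3 h4 q hq
  obtain ⟨hcm, hcmin⟩ := pvCanon_spec N p hN ⟨h1, h2, h3, h4⟩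
  obtain ⟨hcm', hcmin'⟩ := pvCanon_spec N q hN ⟨hgq1, hgq2, hgq3, hgq4⟩
  have hx1 : pvCanon N p ∈ pvForms N q.1 q.2 := (hiff (pvCanon N p)).mpr hcm
  have hx2 : pvCanon N q ∈ pvForms N p.1 p.2 := (hiff (pvCanon N q)).mp hcm'
  have hy1 : ¬ pvLt (pvCanon N p) (pvCanon N q) := hcmin' (pvCanon N p) hx1
  have hy2 : ¬ pvLt (pvCanon N q) (pvCanon N p) := hcmin (pvCanon N q) hx2
  exact pvLt_asymm_eq (pvCanon N q) (pvCanon N p) hy2 hy1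

lemma pvCanon_grid (N : Int) (p : Int × Int) (hN : 0 < N) (hg : pvGrid N p) :
    pvGrid N (pvCanon N p) :=
  pvForms_grid N p.1 p.2 hN hg.1 hg.2.1 hg.2.2.1 hg.2.2.2 _ (pvCanon_spec N p hN hg).1

lemma pvCanon_idem (N : Int) (p : Int × Int) (hN : 0 < N) (hg : pvGrid N p) :
    pvCanon N (pvCanon N p) = pvCanon N p :=
  pvCanon_eq_of_mem N p _ hN hg (pvCanon_spec N p hN hg).1

lemma pvCanon_le (N : Int) (p : Int × Int) (hN : 0 < N) (hg : pvGrid N p) :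
    pvCanon N p = p ∨ pvLt (pvCanon N p) p := by
  obtain ⟨hcm, hcmin⟩ := pvCanon_spec N p hN hg
  have hnp : ¬ pvLt p (pvCanon N p) := hcmin p (by cases p; exact pvForms_self N _ _)
  by_cases he : pvCanon N p = p
  · exact Or.inl he
  · refine Or.inr ?_
    unfold pvLt at *
    rw [Prod.ext_iff] at he
    omega

lemma pvMem_self (N : Int) (p : Int × Int) : p ∈ pvForms N p.1 p.2 := by
  cases p; exact pvForms_self N _ _

lemma pvMem_symm (N : Int) (p q : Int × Int) (hN : 0 < N) (hg : pvGrid N p)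
    (hq : q ∈ pvForms N p.1 p.2) : p ∈ pvForms N q.1 q.2 :=
  (pvForms_closed N p.1 p.2 hN hg.1 hg.2.1 hg.2.2.1 hg.2.2.2 q hq p).mpr (pvMem_self N p)

lemma pvCanon_iff_mem (N : Int) (p q : Int × Int) (hN : 0 < N) (hg : pvGrid N p)
    (hgq : pvGrid N q) : pvCanon N q = pvCanon N p ↔ q ∈ pvForms N p.1 p.2 := by
  constructor
  · intro h
    -- q ∈ forms q = forms (canon q) = forms (canon p) = forms p
    have hq := pvMem_self N q
    have hcq := (pvCanon_spec N q hN hgq).1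
    have hiffq := pvForms_closed N q.1 q.2 hN hgq.1 hgq.2.1 hgq.2.2.1 hgq.2.2.2 _ hcq
    have hcp := (pvCanon_spec N p hN hg).1
    have hiffp := pvForms_closed N p.1 p.2 hN hg.1 hg.2.1 hg.2.2.1 hg.2.2.2 _ hcp
    have : q ∈ pvForms N (pvCanon N q).1 (pvCanon N q).2 := (hiffq q).mpr hq
    rw [h] at this
    exact (hiffp q).mp this
  · intro h
    exact pvCanon_eq_of_mem N p q hN hg h
lemma pvScan_mem (N : Int) (q : Int × Int) : q ∈ pvScan N ↔ pvGrid N q := by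
  cases q with
  | mk a b =>
    simp only [pvScan, List.mem_flatMap, List.mem_map, PySem.List.mem_pyRange_one, pvGrid,
      Prod.mk.injEq]
    constructor
    · rintro ⟨m1, ⟨hm1, hm1'⟩, m2, ⟨hm2, hm2'⟩, he1, he2⟩
      exact ⟨by omega, by omega, by omega, by omega⟩
    · rintro ⟨h1, h2, h3, h4⟩
      exact ⟨a, ⟨h1, h2⟩, b, ⟨h3, h4⟩, rfl, rfl⟩

lemma pvScan_pairwise (N : Int) : (pvScan N).Pairwise pvLt := by
  unfold pvScan
  rw [List.pairwise_flatMap]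
  constructor
  · intro m1 _
    rw [List.pairwise_map]
    refine (PySem.List.pairwise_lt_pyRange_one 0 N).imp ?_
    intro a b h
    exact Or.inr ⟨rfl, h⟩
  · refine (PySem.List.pairwise_lt_pyRange_one 0 N).imp ?_
    intro a b h x hx y hy
    simp only [List.mem_map] at hx hy
    obtain ⟨u, _, hu⟩ := hx
    obtain ⟨v, _, hv⟩ := hy
    subst hu hv
    exact Or.inl h

lemma pvScan_nodup (N : Int) : (pvScan N).Nodup := by
  have h := pvScan_pairwise N
  unfold List.Nodup
  refine h.imp ?_
  intro a b hab he
  subst he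
  unfold pvLt at hab
  omega

lemma pvFoldA (N : Int) (init : PySem.Set (Int × Int) × List (List (Int × Int))) :
    (PySem.List.pyRange 0 N).foldl
      (fun st m1 => (PySem.List.pyRange 0 N).foldl (fun st m2 => pvStepA N m1 m2 st) st) init
    = (pvScan N).foldl (fun st c => pvStepA N c.1 c.2 st) init := by
  unfold pvScan
  rw [List.foldl_flatMap]
  congr 1
  funext st m1
  rw [List.foldl_map]

lemma pvFoldB (N : Int) (init : PySem.Dict (Int × Int) (List (Int × Int))) :
    (PySem.List.pyRange 0 N).foldl
      (fun d m1 => (PySem.List.pyRange 0 N).foldl (fun d m2 => pvStepB N m1 m2 d) d) init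
    = (pvScan N).foldl (fun d c => pvStepB N c.1 c.2 d) init := by
  unfold pvScan
  rw [List.foldl_flatMap]
  congr 1
  funext st m1
  rw [List.foldl_map]
lemma pvGetD_mk_of_mem {ν : Type} (items : List ((Int × Int) × ν)) (k : Int × Int) (v : ν)
    (dflt : ν) (hnd : (items.map Prod.fst).Nodup) (hm : (k, v) ∈ items) :
    (PySem.Dict.mk items).getD k dflt = v := by
  induction items with
  | nil => simp at hm
  | cons p rest ih =>
    simp only [List.map_cons, List.nodup_cons, List.mem_map] at hnd
    rcases List.mem_cons.mp hm with h|h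
    · subst h
      simp [PySem.Dict.getD, PySem.Dict.get?]
    · have hne : p.1 ≠ k := by
        intro he
        exact hnd.1 ⟨(k, v), h, by rw [he]⟩
      have := ih hnd.2 h
      simp only [PySem.Dict.getD, PySem.Dict.get?] at this ⊢
      cases p with
      | mk pk pv =>
        rw [List.find?]
        have hb : (pk == k) = false := by
          simpa using hne
        rw [hb]
        exact this
def pvInv (N : Int) (l : List (Int × Int))
    (st : PySem.Set (Int × Int) × List (List (Int × Int)))
    (d : PySem.Dict (Int × Int) (List (Int × Int))) : Prop :=
  (∀ q, q ∈ st.1 ↔ ∃ p ∈ l, q ∈ pvForms N p.1 p.2) ∧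
  st.2 = (pvReps N l).map (fun r => PySem.List.sorted (pvOrbitA N r.1 r.2) (fun p => toLex p)) ∧
  d.items = (pvReps N l).map (fun r => (r, l.filter (fun q => pvCanon N q == r)))

lemma pvLt_trans (p q r : Int × Int) (h1 : pvLt p q) (h2 : pvLt q r) : pvLt p r := by
  unfold pvLt at *; omega

lemma pvFilterSingleton {α : Type} (p : α → Bool) (c : α) :
    List.filter p [c] = if p c then [c] else [] := by
  cases h : p c
  · simp [List.filter, h]
  · simp [List.filter, h]

lemma pvRepsNodup (N : Int) (l : List (Int × Int)) (h : l.Nodup) : (pvReps N l).Nodup :=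
  h.filter _

lemma pvRepsMem (N : Int) (l : List (Int × Int)) (r : Int × Int) :
    r ∈ pvReps N l ↔ r ∈ l ∧ pvCanon N r = r := by
  simp [pvReps, List.mem_filter]

set_option maxHeartbeats 2000000 in
lemma pvStep_inv (N : Int) (l : List (Int × Int)) (c : Int × Int)
    (hg : pvGrid N c) (hl : ∀ q, q ∈ l ↔ pvGrid N q ∧ pvLt q c)
    (hlnd : l.Nodup)
    (st : PySem.Set (Int × Int) × List (List (Int × Int)))
    (d : PySem.Dict (Int × Int) (List (Int × Int))) (h : pvInv N l st d) :
    pvInv N (l ++ [c]) (pvStepA N c.1 c.2 st) (pvStepB N c.1 c.2 d) := by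
  obtain ⟨hv, ho, hd⟩ := h
  have hN : 0 < N := by obtain ⟨a, b, _, _⟩ := hg; omega
  have hcl : c ∉ l := fun hc => pvLt_irrefl c ((hl c).mp hc).2
  have hgl : ∀ p ∈ l, pvGrid N p := fun p hp => ((hl p).mp hp).1
  have hcg := pvCanon_grid N c hN hg
  have hcc := (pvCanon_spec N c hN hg).1     -- canon c ∈ forms c
  -- the two branch conditions agree: both say "the canon of c was already scanned"
  have hcands : (∃ p ∈ l, c ∈ pvForms N p.1 p.2) ↔ pvCanon N c ∈ l := by
    constructor
    · rintro ⟨p, hp, hcp⟩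
      have hgp := hgl p hp
      have heq : pvCanon N c = pvCanon N p := pvCanon_eq_of_mem N p c hN hgp hcp
      rcases pvCanon_le N p hN hgp with he | hlt
      · rw [hl]
        refine ⟨hcg, ?_⟩
        rw [heq, he]
        exact ((hl p).mp hp).2
      · rw [hl]
        exact ⟨hcg, pvLt_trans _ _ _ (heq ▸ hlt) ((hl p).mp hp).2⟩
    · intro hin
      exact ⟨pvCanon N c, hin, pvMem_symm N c _ hN hg hcc⟩
  have hkeys : d.keys = pvReps N l := by
    unfold PySem.Dict.keys
    rw [hd, List.map_map]
    exact List.map_id _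
  have hcontains : d.contains (pvCanon N c) = true ↔ pvCanon N c ∈ l := by
    rw [PySem.Dict.contains_eq_decide_mem_keys, hkeys, decide_eq_true_eq, pvRepsMem]
    constructor
    · exact fun h => h.1
    · exact fun h => ⟨h, pvCanon_idem N c hN hg⟩
  by_cases hsel : pvCanon N c ∈ l
  -- SKIP / APPEND branch
  · have hcne : pvCanon N c ≠ c := fun he => hcl (he ▸ hsel)
    have hguardA : (c.1, c.2) ∈ st.1 := by
      rw [Prod.mk.eta, hv]
      exact hcands.mpr hsel
    have hiffc := pvForms_closed N c.1 c.2 hN hg.1 hg.2.1 hg.2.2.1 hg.2.2.2 _ hcc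
    have hrepsc : pvReps N (l ++ [c]) = pvReps N l := by
      unfold pvReps
      rw [List.filter_append, pvFilterSingleton,
        if_neg (by rw [beq_iff_eq]; exact hcne), List.append_nil]
    have hstA : pvStepA N c.1 c.2 st = st := by
      unfold pvStepA
      rw [if_pos hguardA]
    refine ⟨?_, ?_, ?_⟩
    · intro q
      rw [hstA, hv]
      constructor
      · rintro ⟨p, hp, hq⟩; exact ⟨p, by simp [hp], hq⟩
      · rintro ⟨p, hp, hq⟩
        rcases List.mem_append.mp hp with h'|h'
        · exact ⟨p, h', hq⟩
        · have hpc : p = c := by simpa using h'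
          exact ⟨pvCanon N c, hsel, (hiffc q).mpr (hpc ▸ hq)⟩
    · rw [hstA, ho, hrepsc]
    · have hguardB : d.contains (pvKey N c.1 c.2) = true := hcontains.mpr hsel
      have hguardB2 : d.contains (pvCanon N c) = true := hguardB
      rw [show pvStepB N c.1 c.2 d
            = d.insert (pvCanon N c)
                ((d.getD (pvCanon N c) []) ++ [(c.1, c.2)]) from by
        unfold pvStepB PySem.Dict.modify
        rw [if_pos hguardB]
        rfl]
      have hbucket : d.getD (pvCanon N c) []
          = l.filter (fun q => pvCanon N q == pvCanon N c) := by
        have hndk : (d.items.map Prod.fst).Nodup := by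
          have he : d.items.map Prod.fst = d.keys := rfl
          rw [he, hkeys]
          exact pvRepsNodup N l hlnd
        exact pvGetD_mk_of_mem d.items _ _ _ hndk (by
          rw [hd, List.mem_map]
          exact ⟨pvCanon N c, (pvRepsMem N l _).mpr ⟨hsel, pvCanon_idem N c hN hg⟩, rfl⟩)
      rw [PySem.Dict.items_insert_of_contains _ _ hguardB2, hd, List.map_map, hrepsc]
      refine List.map_congr_left ?_
      intro r hr
      obtain ⟨hrl, hrc⟩ := (pvRepsMem N l r).mp hr
      show (if ((r, List.filter (fun q => pvCanon N q == r) l).1 == pvCanon N c) = true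
            then (pvCanon N c, d.getD (pvCanon N c) [] ++ [(c.1, c.2)])
            else (r, List.filter (fun q => pvCanon N q == r) l))
          = (r, List.filter (fun q => pvCanon N q == r) (l ++ [c]))
      rw [List.filter_append, pvFilterSingleton]
      by_cases hre : r = pvCanon N c
      · subst hre
        rw [if_pos (by rw [beq_iff_eq])]
        rw [if_pos (by rw [beq_iff_eq]), hbucket, Prod.mk.eta]
      · rw [if_neg (by rw [beq_iff_eq]; exact hre)]
        rw [if_neg (by rw [beq_iff_eq]; exact fun he => hre he.symm), List.append_nil]
  -- NEW ORBIT branch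
  · have hcceq : pvCanon N c = c := by
      rcases pvCanon_le N c hN hg with he | hlt
      · exact he
      · exact absurd ((hl _).mpr ⟨hcg, hlt⟩) hsel
    have hguardA : (c.1, c.2) ∉ st.1 := by
      rw [Prod.mk.eta, hv]
      exact fun hx => hsel (hcands.mp hx)
    have hrepsc : pvReps N (l ++ [c]) = pvReps N l ++ [c] := by
      unfold pvReps
      rw [List.filter_append, pvFilterSingleton, if_pos (by rw [beq_iff_eq]; exact hcceq)]
    have hstA : pvStepA N c.1 c.2 st
        = (PySem.Set.update st.1 (pvOrbitA N c.1 c.2),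
           st.2 ++ [PySem.List.sorted (pvOrbitA N c.1 c.2) (fun p => toLex p)]) := by
      unfold pvStepA
      rw [if_neg hguardA]
    refine ⟨?_, ?_, ?_⟩
    · intro q
      rw [hstA]
      simp only [PySem.Set.mem_update]
      rw [hv, pvOrbitA_mem N c.1 c.2 hN hg.1 hg.2.1 hg.2.2.1 hg.2.2.2 q]
      constructor
      · rintro (⟨p, hp, hq⟩ | hq)
        · exact ⟨p, by simp [hp], hq⟩
        · exact ⟨c, by simp, hq⟩
      · rintro ⟨p, hp, hq⟩
        rcases List.mem_append.mp hp with h'|h'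
        · exact Or.inl ⟨p, h', hq⟩
        · have hpc : p = c := by simpa using h'
          exact Or.inr (hpc ▸ hq)
    · rw [hstA, ho, hrepsc, List.map_append]
      rfl
    · have hguardB : d.contains (pvKey N c.1 c.2) = false := by
        cases hb : d.contains (pvCanon N c)
        · exact hb
        · exact absurd (hcontains.mp hb) hsel
      rw [show pvStepB N c.1 c.2 d = d.insert (pvKey N c.1 c.2) [(c.1, c.2)] from by
        unfold pvStepB
        rw [hguardB]
        simp only [Bool.false_eq_true, if_false]]
      rw [PySem.Dict.items_insert_of_not_contains _ _ hguardB, hd, hrepsc, List.map_append]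
      congr 1
      · refine List.map_congr_left ?_
        intro r hr
        obtain ⟨hrl, hrc⟩ := (pvRepsMem N l r).mp hr
        rw [List.filter_append, pvFilterSingleton,
          if_neg (by rw [beq_iff_eq, hcceq]; exact fun he => hcl (he ▸ hrl)),
          List.append_nil]
      · simp only [List.map_cons, List.map_nil]
        rw [show pvKey N c.1 c.2 = pvCanon N c from rfl, hcceq, Prod.mk.eta]
        have h1 : List.filter (fun q => pvCanon N q == c) l = [] := by
          rw [List.filter_eq_nil_iff]
          intro q hq hbe
          have hqc : pvCanon N q = c := by rwa [beq_iff_eq] at hbe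
          have hgq := hgl q hq
          rcases pvCanon_le N q hN hgq with he | hlt
          · exact hcl (by rw [← he, hqc] at hq; exact hq)
          · rw [hqc] at hlt
            exact pvLt_irrefl c (pvLt_trans _ _ _ hlt ((hl q).mp hq).2)
        rw [List.filter_append, pvFilterSingleton, if_pos (by rw [beq_iff_eq]; exact hcceq),
          h1, List.nil_append]
lemma pvPrefix_char (N : Int) (l : List (Int × Int)) (c : Int × Int) (rest : List (Int × Int))
    (hsc : pvScan N = l ++ c :: rest) (q : Int × Int) :
    q ∈ l ↔ pvGrid N q ∧ pvLt q c := by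
  have hpw := pvScan_pairwise N
  rw [hsc] at hpw
  rw [List.pairwise_append] at hpw
  obtain ⟨hpl, hpr, hcross⟩ := hpw
  constructor
  · intro hq
    have hqs : q ∈ pvScan N := by rw [hsc]; exact List.mem_append_left _ hq
    exact ⟨(pvScan_mem N q).mp hqs, hcross q hq c List.mem_cons_self⟩
  · rintro ⟨hgq, hlt⟩
    have hqs : q ∈ pvScan N := (pvScan_mem N q).mpr hgq
    rw [hsc] at hqs
    rcases List.mem_append.mp hqs with h|h
    · exact h
    · rcases List.mem_cons.mp h with h'|h'
      · subst h'; exact absurd hlt (pvLt_irrefl q)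
      · have := (List.pairwise_cons.mp hpr).1 q h'
        exact absurd (pvLt_trans _ _ _ hlt this) (pvLt_irrefl q)

lemma pvMain (N : Int) : ∀ (rest l : List (Int × Int)),
    pvScan N = l ++ rest → ∀ st d, pvInv N l st d →
    pvInv N (pvScan N) (rest.foldl (fun st c => pvStepA N c.1 c.2 st) st)
      (rest.foldl (fun d c => pvStepB N c.1 c.2 d) d) := by
  intro rest
  induction rest with
  | nil =>
    intro l hsc st d h
    simp only [List.foldl_nil]
    rw [hsc, List.append_nil]
    exact h
  | cons c rest' ih =>
    intro l hsc st d h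
    simp only [List.foldl_cons]
    have hgc : pvGrid N c := (pvScan_mem N c).mp (by
      rw [hsc]
      exact List.mem_append_right _ List.mem_cons_self)
    have hlchar := pvPrefix_char N l c rest' hsc
    have hlnd : l.Nodup := by
      have := pvScan_nodup N
      rw [hsc] at this
      exact (List.nodup_append.mp this).1
    have hstep := pvStep_inv N l c hgc hlchar hlnd st d h
    exact ih (l ++ [c]) (by rw [hsc, List.append_assoc]; rfl) _ _ hstep

lemma pvEntry (N : Int) (r : Int × Int) (hr : r ∈ pvReps N (pvScan N)) :
    PySem.List.sorted (pvOrbitA N r.1 r.2) (fun p => toLex p)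
      = (pvScan N).filter (fun q => pvCanon N q == r) := by
  obtain ⟨hrs, hrc⟩ := (pvRepsMem N (pvScan N) r).mp hr
  have hgr : pvGrid N r := (pvScan_mem N r).mp hrs
  have hN : 0 < N := by obtain ⟨a, b, _, _⟩ := hgr; omega
  refine PySem.List.sorted_eq_of_perm_of_pairwise_lt _ _ _ ?_ ?_
  · -- the filtered scan is a permutation of the orbit set
    rw [List.perm_ext_iff_of_nodup (List.Nodup.filter _ (pvScan_nodup N)) (pvOrbitA_nodup N r.1 r.2)]
    intro q
    rw [List.mem_filter, pvOrbitA_mem N r.1 r.2 hN hgr.1 hgr.2.1 hgr.2.2.1 hgr.2.2.2 q]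
    constructor
    · rintro ⟨hqs, hqc⟩
      have hgq := (pvScan_mem N q).mp hqs
      rw [beq_iff_eq] at hqc
      exact (pvCanon_iff_mem N r q hN hgr hgq).mp (by rw [hqc, hrc])
    · intro hq
      have hgq := pvForms_grid N r.1 r.2 hN hgr.1 hgr.2.1 hgr.2.2.1 hgr.2.2.2 q hq
      refine ⟨(pvScan_mem N q).mpr hgq, ?_⟩
      rw [beq_iff_eq]
      rw [(pvCanon_iff_mem N r q hN hgr hgq).mpr hq, hrc]
  · -- strictly increasing in the lexicographic key
    have hpw : ((pvScan N).filter (fun q => pvCanon N q == r)).Pairwise pvLt :=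
      List.Pairwise.sublist List.filter_sublist (pvScan_pairwise N)
    refine hpw.imp ?_
    intro a b hab
    rw [Prod.Lex.toLex_lt_toLex]
    exact hab
theorem c4v_fourier_orbits_spec : Claim_equal_c4v_fourier_orbits := by
  intro N _
  unfold Spec_c4v_fourier_orbits c4v_fourier_orbits c4v_fourier_orbits_alt
  simp only [pvFoldA, pvFoldB]
  obtain ⟨hv, ho, hd⟩ := pvMain N (pvScan N) [] rfl
    ((PySem.Set.empty : PySem.Set (Int × Int)), ([] : List (List (Int × Int))))
    (PySem.Dict.empty : PySem.Dict (Int × Int) (List (Int × Int)))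
    ⟨by simp [PySem.Set.empty], rfl, rfl⟩
  have hvals :
      ((pvScan N).foldl (fun d c => pvStepB N c.1 c.2 d)
        (PySem.Dict.empty : PySem.Dict (Int × Int) (List (Int × Int)))).values
      = ((pvScan N).foldl (fun st c => pvStepA N c.1 c.2 st)
          ((PySem.Set.empty : PySem.Set (Int × Int)), ([] : List (List (Int × Int))))).2 := by
    unfold PySem.Dict.values
    rw [hd, List.map_map, ho]
    refine (List.map_congr_left ?_).symm
    intro r hr
    exact pvEntry N r hr
  rw [hvals]
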